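-- pv_equiv track=rewrite | github.com/LoumaCht/Dune | Atelier4.py | fin_de_partie
-- ===== SOURCE A (Python) =====
-- def fin_de_partie(grille):
--     caractere_o = 'o'
--     caractere_x = 'x'
--     somme_o = 0
--     somme_x = 0
--     for i in range(len(grille)):
--         for j in range(len(grille[i])):
--             if grille[i][j] == caractere_x:
--                 somme_x += 1
--             elif grille[i][j] == caractere_o:
--                 somme_o +=1
--     return (somme_o==0 or somme_x==0)
-- ===== SOURCE B (Python) =====
-- def fin_de_partie(grille):
--     has_o = any('o' in ligne for ligne in grille)
--     has_x = any('x' in ligne for ligne in grille)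
--     return not (has_o and has_x)
-- ===== Notes on version B (the rewrite author's own statement) =====
-- stated objective: simpler
-- what changed: Replaces A's single counting pass (two integer counters updated by a per-cell branch chain) with two staged short-circuit existence searches (any + per-row membership), one per target character, combined by a boolean formula.
import Mathlib
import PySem

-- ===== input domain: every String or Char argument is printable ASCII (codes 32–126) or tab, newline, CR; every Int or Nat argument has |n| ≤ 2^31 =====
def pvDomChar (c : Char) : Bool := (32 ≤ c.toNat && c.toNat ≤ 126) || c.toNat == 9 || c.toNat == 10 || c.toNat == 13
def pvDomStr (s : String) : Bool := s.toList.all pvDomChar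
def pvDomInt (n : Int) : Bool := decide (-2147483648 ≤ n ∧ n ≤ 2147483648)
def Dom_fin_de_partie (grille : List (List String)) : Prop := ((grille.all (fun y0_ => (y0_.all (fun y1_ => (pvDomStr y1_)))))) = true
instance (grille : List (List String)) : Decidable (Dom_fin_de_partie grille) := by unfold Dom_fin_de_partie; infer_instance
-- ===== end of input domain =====

-- ===== PORT A =====
-- B answers by two staged short-circuit existence searches (one per character) instead of A's single counting pass; return value only.
def fin_de_partie (grille : List (List String)) : Bool :=
  let p : Int × Int :=
    (PySem.List.pyRange 0 (grille.length : Int) 1).foldl (fun s i =>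
      let ligne := PySem.List.pyGetD grille i []
      (PySem.List.pyRange 0 (ligne.length : Int) 1).foldl (fun s j =>
        let cell := PySem.List.pyGetD ligne j ""
        if cell = "x" then (s.1, s.2 + 1)
        else if cell = "o" then (s.1 + 1, s.2)
        else s) s) ((0 : Int), (0 : Int))
  (p.1 == 0 || p.2 == 0)

-- ===== PORT B =====
def fin_de_partie_alt (grille : List (List String)) : Bool :=
  let has_o := grille.any (fun ligne => ligne.contains "o")
  let has_x := grille.any (fun ligne => ligne.contains "x")
  !(has_o && has_x)

-- ===== PRECONDITION & SPEC =====
def Spec_fin_de_partie (grille : List (List String)) (out : Bool) : Prop := out = fin_de_partie_alt grille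
instance (grille : List (List String)) (out : Bool) : Decidable (Spec_fin_de_partie grille out) := by unfold Spec_fin_de_partie; infer_instance

-- ===== CLAIM =====
def Claim_equal_fin_de_partie : Prop := ∀ (grille : List (List String)), Dom_fin_de_partie grille → Spec_fin_de_partie grille (fin_de_partie grille)

-- ===== LEMMAS AND PROOFS =====
-- the counting fold over a row adds the row's counts of "o" and "x" to the accumulator
theorem row_fold (ligne : List String) (s : Int × Int) :
    ligne.foldl (fun s cell =>
        if cell = "x" then (s.1, s.2 + 1)
        else if cell = "o" then (s.1 + 1, s.2)
        else s) s
      = (s.1 + ligne.count "o", s.2 + ligne.count "x") := by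
  induction ligne generalizing s with
  | nil => simp
  | cons c t ih =>
    simp only [List.foldl_cons, List.count_cons, ih]
    by_cases hx : c = "x" <;> by_cases ho : c = "o" <;> simp_all <;> ring

theorem grid_fold (grille : List (List String)) (s : Int × Int) :
    grille.foldl (fun s ligne =>
        ligne.foldl (fun s cell =>
          if cell = "x" then (s.1, s.2 + 1)
          else if cell = "o" then (s.1 + 1, s.2)
          else s) s) s
      = (s.1 + (grille.flatMap (fun ligne => ligne)).count "o",
         s.2 + (grille.flatMap (fun ligne => ligne)).count "x") := by
  induction grille generalizing s with
  | nil => simp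
  | cons l t ih =>
    rw [List.foldl_cons, row_fold, ih]
    simp only [List.flatMap_cons, List.count_append, Prod.mk.injEq]
    constructor <;> push_cast <;> ring

-- ===== VERDICT =====
theorem fin_de_partie_spec : Claim_equal_fin_de_partie := by
  intro grille _
  unfold Spec_fin_de_partie fin_de_partie fin_de_partie_alt
  have h1 : ∀ (ligne : List String) (s : Int × Int),
      (PySem.List.pyRange 0 (ligne.length : Int) 1).foldl (fun s j =>
          if PySem.List.pyGetD ligne j "" = "x" then (s.1, s.2 + 1)
          else if PySem.List.pyGetD ligne j "" = "o" then (s.1 + 1, s.2)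
          else s) s
        = ligne.foldl (fun s cell =>
            if cell = "x" then (s.1, s.2 + 1)
            else if cell = "o" then (s.1 + 1, s.2)
            else s) s := fun ligne s =>
    PySem.List.foldl_pyRange_zero_pyGetD' ligne ""
      (fun s cell => if cell = "x" then (s.1, s.2 + 1)
        else if cell = "o" then (s.1 + 1, s.2) else s) s
  simp only [h1]
  rw [PySem.List.foldl_pyRange_zero_pyGetD' grille []
    (fun (s : Int × Int) (ligne : List String) =>
      ligne.foldl (fun s cell =>
        if cell = "x" then (s.1, s.2 + 1)
        else if cell = "o" then (s.1 + 1, s.2)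
        else s) s) ((0 : Int), (0 : Int)), grid_fold]
  rw [Bool.eq_iff_iff]
  simp [Int.natCast_eq_zero, List.count_eq_zero, List.mem_flatten]
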